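-- pv_equiv track=rewrite | github.com/RuanVitorr/atividades-de-Computabilidade-e-Complexidade-de-Algortimos | att19.py | afn_substring_010
-- ===== SOURCE A (Python) =====
-- def afn_substring_010(palavra):
--     estado = 'q0'
--
--     for char in palavra:
--         if estado == 'q0':
--             if char == '0':
--                 estado = 'q1'
--             elif char == '1':
--                 estado = 'q0'
--             else:
--                 return 'palavra invalida (caractere inválido)'
--         elif estado == 'q1':
--             if char == '0':
--                 estado = 'q1'
--             elif char == '1':
--                 estado = 'q2'
--             else:
--                 return 'palavra invalida (caractere inválido)'
--         elif estado == 'q2':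
--             if char == '0':
--                 estado = 'q3'
--             elif char == '1':
--                 estado = 'q0'
--             else:
--                 return 'palavra invalida (caractere inválido)'
--         elif estado == 'q3':
--             if char == '0':
--                 estado = 'q3'
--             elif char == '1':
--                 estado = 'q3'
--             else:
--                 return 'palavra invalida (caractere inválido)'
--
--     if estado == 'q3':
--         return "palavra valida (contém a substring '010')"
--     else:
--         return "palavra invalida (não contém a substring '010')"
-- ===== SOURCE B (Python) =====
-- def afn_substring_010(palavra):
--     for char in palavra:
--         if char not in '01':
--             return 'palavra invalida (caractere inválido)'
--     if '010' in palavra: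
--         return "palavra valida (contém a substring '010')"
--     return "palavra invalida (não contém a substring '010')"
-- ===== Notes on version B (the rewrite author's own statement) =====
-- stated objective: simpler
-- what changed: Replaced the hand-rolled 4-state DFA with a character-validation pass followed by Python's built-in substring membership test for the pattern 010.
import Mathlib
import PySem

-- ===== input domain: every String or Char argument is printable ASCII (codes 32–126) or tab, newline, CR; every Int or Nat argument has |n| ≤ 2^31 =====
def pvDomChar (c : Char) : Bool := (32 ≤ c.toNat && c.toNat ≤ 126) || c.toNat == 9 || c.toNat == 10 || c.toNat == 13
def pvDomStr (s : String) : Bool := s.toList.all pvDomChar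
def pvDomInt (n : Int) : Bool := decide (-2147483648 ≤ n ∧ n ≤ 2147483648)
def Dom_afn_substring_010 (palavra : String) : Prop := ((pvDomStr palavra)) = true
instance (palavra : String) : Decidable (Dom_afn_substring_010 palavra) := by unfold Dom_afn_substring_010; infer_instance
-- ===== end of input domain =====

-- B replaces A's hand-rolled 4-state DFA by a character-validation pass plus a built-in
-- substring test ('010' in palavra); same values on every input, objective: simpler.


-- ===== PORT A =====
-- the loop of A: state 'estado' is a string exactly as in the Python; early return on an
-- invalid character, final test 'estado == q3' after the loop
def afnLoopA : List Char → String → String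
  | [], estado =>
    if estado == "q3" then "palavra valida (contém a substring '010')"
    else "palavra invalida (não contém a substring '010')"
  | c :: rest, estado =>
    if estado == "q0" then
      if c == '0' then afnLoopA rest "q1"
      else if c == '1' then afnLoopA rest "q0"
      else "palavra invalida (caractere inválido)"
    else if estado == "q1" then
      if c == '0' then afnLoopA rest "q1"
      else if c == '1' then afnLoopA rest "q2"
      else "palavra invalida (caractere inválido)"
    else if estado == "q2" then
      if c == '0' then afnLoopA rest "q3"
      else if c == '1' then afnLoopA rest "q0"
      else "palavra invalida (caractere inválido)"
    else if estado == "q3" then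
      if c == '0' then afnLoopA rest "q3"
      else if c == '1' then afnLoopA rest "q3"
      else "palavra invalida (caractere inválido)"
    else afnLoopA rest estado  -- unreachable: estado is always one of q0..q3

def afn_substring_010 (palavra : String) : String :=
  afnLoopA palavra.toList "q0"

-- ===== PORT B =====
def afn_substring_010_alt (palavra : String) : String :=
  -- 'for char in palavra: if char not in "01": return …' = a short-circuit all-pass
  if palavra.toList.all (fun c => c == '0' || c == '1') then
    if PySem.Str.isIn "010" palavra then "palavra valida (contém a substring '010')"
    else "palavra invalida (não contém a substring '010')"
  else "palavra invalida (caractere inválido)"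

-- ===== PRECONDITION & SPEC =====
def Spec_afn_substring_010 (palavra : String) (out : String) : Prop := out = afn_substring_010_alt palavra
instance (palavra : String) (out : String) : Decidable (Spec_afn_substring_010 palavra out) := by unfold Spec_afn_substring_010; infer_instance

-- ===== CLAIM (what is proved, stated in full; the proofs are below) =====
def Claim_equal_afn_substring_010 : Prop := ∀ (palavra : String), Dom_afn_substring_010 palavra → Spec_afn_substring_010 palavra (afn_substring_010 palavra)

-- ===== LEMMAS AND PROOFS =====

-- the characters the DFA accepts
def pvIsBit (c : Char) : Bool := c == '0' || c == '1'

-- the prefix of input that would drive the DFA from q0 into each non-final state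
def pvPad : String → List Char
  | "q1" => ['0']
  | "q2" => ['0', '1']
  | _ => []

-- from q3 the DFA stays in q3, so only validity matters
theorem afnLoopA_q3 (cs : List Char) :
    afnLoopA cs "q3" =
      if cs.all pvIsBit then "palavra valida (contém a substring '010')"
      else "palavra invalida (caractere inválido)" := by
  induction cs with
  | nil => rfl
  | cons c rest ih =>
    by_cases h0 : c = '0'
    · simp [afnLoopA, h0, ih, pvIsBit]
    · by_cases h1 : c = '1'
      · simp [afnLoopA, h1, ih, pvIsBit]
      · simp [afnLoopA, h0, h1, pvIsBit]

-- main invariant: from a non-final state st the DFA accepts iff '010' occurs in pvPad st ++ cs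
theorem afnLoopA_char (cs : List Char) : ∀ st, st = "q0" ∨ st = "q1" ∨ st = "q2" →
    afnLoopA cs st =
      if cs.all pvIsBit then
        (if ['0','1','0'] <:+: (pvPad st ++ cs) then "palavra valida (contém a substring '010')"
         else "palavra invalida (não contém a substring '010')")
      else "palavra invalida (caractere inválido)" := by
  induction cs with
  | nil =>
    rintro st (rfl | rfl | rfl) <;> simp [afnLoopA, pvPad] <;> decide
  | cons c rest ih =>
    rintro st (rfl | rfl | rfl)
    · by_cases h0 : c = '0'
      · subst h0
        rw [show afnLoopA ('0' :: rest) "q0" = afnLoopA rest "q1" by simp [afnLoopA],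
            ih "q1" (by simp)]
        simp [pvPad, pvIsBit]
      · by_cases h1 : c = '1'
        · subst h1
          rw [show afnLoopA ('1' :: rest) "q0" = afnLoopA rest "q0" by simp [afnLoopA],
              ih "q0" (by simp)]
          have hI : (['0','1','0'] <:+: ('1' :: rest)) ↔ (['0','1','0'] <:+: rest) := by
            simp [List.infix_cons_iff, List.cons_prefix_iff]
          simp [pvPad, pvIsBit, hI]
        · simp [afnLoopA, h0, h1, pvIsBit]
    · by_cases h0 : c = '0'
      · subst h0
        rw [show afnLoopA ('0' :: rest) "q1" = afnLoopA rest "q1" by simp [afnLoopA],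
            ih "q1" (by simp)]
        have hI : (['0','1','0'] <:+: ('0' :: '0' :: rest)) ↔ (['0','1','0'] <:+: ('0' :: rest)) := by
          simp [List.infix_cons_iff, List.cons_prefix_iff]
        simp [pvPad, pvIsBit, hI]
      · by_cases h1 : c = '1'
        · subst h1
          rw [show afnLoopA ('1' :: rest) "q1" = afnLoopA rest "q2" by simp [afnLoopA],
              ih "q2" (by simp)]
          simp [pvPad, pvIsBit]
        · simp [afnLoopA, h0, h1, pvIsBit]
    · by_cases h0 : c = '0'
      · subst h0
        rw [show afnLoopA ('0' :: rest) "q2" = afnLoopA rest "q3" by simp [afnLoopA],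
            afnLoopA_q3]
        have hI : ['0','1','0'] <:+: ('0' :: '1' :: '0' :: rest) :=
          (List.prefix_append ['0','1','0'] rest).isInfix
        simp [pvPad, pvIsBit, hI]
      · by_cases h1 : c = '1'
        · subst h1
          rw [show afnLoopA ('1' :: rest) "q2" = afnLoopA rest "q0" by simp [afnLoopA],
              ih "q0" (by simp)]
          have hI : (['0','1','0'] <:+: ('0' :: '1' :: '1' :: rest)) ↔ (['0','1','0'] <:+: rest) := by
            simp [List.infix_cons_iff, List.cons_prefix_iff]
          simp [pvPad, pvIsBit, hI]
        · simp [afnLoopA, h0, h1, pvIsBit]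

-- ===== VERDICT (by name: the statement is the Claim_ definition above) =====
theorem afn_substring_010_spec : Claim_equal_afn_substring_010 := by
  intro palavra _
  unfold Spec_afn_substring_010 afn_substring_010 afn_substring_010_alt
  rw [afnLoopA_char palavra.toList "q0" (by simp)]
  by_cases hv : palavra.toList.all (fun c => c == '0' || c == '1') = true
  · have hall : palavra.toList.all pvIsBit = true := by simpa [pvIsBit] using hv
    by_cases hin : ['0','1','0'] <:+: palavra.toList
    · have hc : PySem.Chars.isIn ['0','1','0'] palavra.toList = true :=
        (PySem.Chars.isIn_iff_infix _ _).2 hin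
      simp [hall, hv, hin, pvPad, PySem.Str.isIn, hc]
    · have hc : PySem.Chars.isIn ['0','1','0'] palavra.toList = false :=
        (PySem.Chars.isIn_eq_false_iff _ _).2 hin
      simp [hall, hv, hin, pvPad, PySem.Str.isIn, hc]
  · have hall : ¬ (palavra.toList.all pvIsBit = true) := by simpa [pvIsBit] using hv
    simp [hall, hv]
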